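-- pv_equiv track=rewrite | github.com/cleo-cyber/datastructures-python | Hackerank/elementary.py | min_moves_to_minimize_length
-- ===== SOURCE A (Python) =====
-- def min_moves_to_minimize_length(word):
--     first_occurrence = {}
--
--     for i, char in enumerate(word):
--         if char not in first_occurrence:
--             first_occurrence[char] = i
--
--     total_moves = 0
--
--     for i, char in enumerate(word):
--         left_distance = i - first_occurrence[char]
--
--         right_distance = len(word) - 1 - i - (len(word) - 1 - word.rindex(char))
--
--         total_moves += min(left_distance, right_distance)
--
--     return total_moves
-- ===== SOURCE B (Python) =====
-- def min_moves_to_minimize_length(word):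
--     # Group occurrence indices per character, then compute each group's
--     # contribution with aggregate arithmetic (counts and sums) instead of a
--     # per-position min(): an index q costs q-first iff 2*q <= first+last,
--     # otherwise it costs last-q.
--     positions = {}
--     for i, ch in enumerate(word):
--         positions.setdefault(ch, []).append(i)
--     total = 0
--     for pl in positions.values():
--         first = pl[0]
--         last = pl[-1]
--         thr = first + last
--         near = [q for q in pl if 2 * q <= thr]
--         k = len(near)
--         total += sum(near) - k * first + ((len(pl) - k) * last - (sum(pl) - sum(near)))
--     return total
-- ===== Notes on version B (the rewrite author's own statement) =====
-- stated objective: faster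
-- what changed: A loops over every position calling word.rindex (a full backward scan) and takes a per-position min; B groups occurrence indices per character in one pass and computes each group's contribution by aggregate arithmetic: it splits the group at the threshold 2*q <= first+last and uses counts and partial sums (sum(near)-k*first + (m-k)*last-sum(far)) with no per-position min.
import Mathlib
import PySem

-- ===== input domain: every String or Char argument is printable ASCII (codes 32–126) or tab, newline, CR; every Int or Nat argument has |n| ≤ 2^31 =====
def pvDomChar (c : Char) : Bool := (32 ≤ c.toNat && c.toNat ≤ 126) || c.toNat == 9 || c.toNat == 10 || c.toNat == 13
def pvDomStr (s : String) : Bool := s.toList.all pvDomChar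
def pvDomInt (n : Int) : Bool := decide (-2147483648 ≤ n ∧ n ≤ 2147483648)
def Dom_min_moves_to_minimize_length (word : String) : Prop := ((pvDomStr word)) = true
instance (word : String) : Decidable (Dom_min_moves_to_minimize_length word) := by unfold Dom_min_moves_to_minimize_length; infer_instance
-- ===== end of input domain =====

-- B replaces A's flat per-position loop (with an O(n) word.rindex scan and a min() at each
-- position) by one grouping pass (char -> occurrence indices) followed by per-group aggregate
-- arithmetic over counts and partial sums; return values agree everywhere.

-- ===== PORT A =====
-- hand port of word.rindex(char) for a single-character needle: the highest index of char in cs.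
-- Exact wherever A evaluates it: A only calls it with a character of word, so a match exists
-- (on an absent character Python raises ValueError; that call never happens in A).
def pvRindexChar (cs : List Char) (c : Char) : Int :=
  (PySem.List.enumerate cs 0).foldl (fun acc p => if p.2 == c then p.1 else acc) (-1)

def min_moves_to_minimize_length (word : String) : Int :=
  let cs := word.toList
  -- first loop: first_occurrence[char] = first index seen
  let first_occurrence : PySem.Dict Char Int :=
    (PySem.List.enumerate cs 0).foldl
      (fun d p => if !(d.contains p.2) then d.insert p.2 p.1 else d) PySem.Dict.empty
  -- second loop: total_moves += min(left_distance, right_distance)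
  -- first_occurrence[char] ported as getD _ 0: the key is always present (char comes from word)
  (PySem.List.enumerate cs 0).foldl
    (fun acc p =>
      let left_distance := p.1 - first_occurrence.getD p.2 0
      let right_distance :=
        (cs.length : Int) - 1 - p.1 - ((cs.length : Int) - 1 - pvRindexChar cs p.2)
      acc + min left_distance right_distance) 0

-- ===== PORT B =====
def min_moves_to_minimize_length_alt (word : String) : Int :=
  let cs := word.toList
  -- positions.setdefault(ch, []).append(i)
  let positions : PySem.Dict Char (List Int) :=
    (PySem.List.enumerate cs 0).foldl
      (fun d p => d.modify p.2 [] (fun l => l ++ [p.1])) PySem.Dict.empty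
  -- for pl in positions.values(): aggregate arithmetic over the threshold split
  -- pl[0] / pl[-1] ported as pyGetD: every stored list is nonempty
  positions.values.foldl
    (fun acc pl =>
      let first := PySem.List.pyGetD pl 0 0
      let last := PySem.List.pyGetD pl (-1) 0
      let thr := first + last
      let near := pl.filter (fun q => decide (2 * q ≤ thr))
      let k : Int := near.length
      acc + (near.sum - k * first + (((pl.length : Int) - k) * last - (pl.sum - near.sum)))) 0

-- ===== PRECONDITION & SPEC =====
def Spec_min_moves_to_minimize_length (word : String) (out : Int) : Prop := out = min_moves_to_minimize_length_alt word
instance (word : String) (out : Int) : Decidable (Spec_min_moves_to_minimize_length word out) := by unfold Spec_min_moves_to_minimize_length; infer_instance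

-- ===== CLAIM (what is proved, stated in full; the proofs are below) =====
def Claim_equal_min_moves_to_minimize_length : Prop := ∀ (word : String), Dom_min_moves_to_minimize_length word → Spec_min_moves_to_minimize_length word (min_moves_to_minimize_length word)

-- ===== LEMMAS AND PROOFS =====

-- the (increasing) list of indices at which c occurs in cs
def pvIdxs (cs : List Char) (c : Char) : List Int :=
  ((PySem.List.enumerate cs 0).filter (fun p => p.2 == c)).map (·.1)

-- A's first loop: the dict of first occurrences, characterised by the filtered index list
theorem pv_first_getD (l : List (Int × Char)) (d : PySem.Dict Char Int) (c : Char) :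
    ((l.foldl (fun d p => if !(d.contains p.2) then d.insert p.2 p.1 else d) d).getD c 0)
    = if d.contains c then d.getD c 0
      else ((l.filter (fun p => p.2 == c)).map (·.1)).headD 0 := by
  induction l generalizing d with
  | nil =>
    simp only [List.foldl_nil, List.filter_nil, List.map_nil, List.headD_nil]
    split
    · rfl
    · next h =>
      rw [PySem.Dict.getD_of_not_contains]
      simpa using h
  | cons p l ih =>
    simp only [List.foldl_cons, List.filter_cons]
    by_cases hc : d.contains p.2
    · simp only [hc, Bool.not_true, Bool.false_eq_true, if_false, ih d]
      by_cases hpc : p.2 = c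
      · subst hpc
        simp [hc]
      · simp [hpc]
    · simp only [hc, Bool.not_false, if_true, ih (d.insert p.2 p.1)]
      by_cases hpc : p.2 = c
      · subst hpc
        simp [hc, PySem.Dict.getD_insert_self]
      · have hcp : ¬ c = p.2 := fun h => hpc h.symm
        have h1 : (d.insert p.2 p.1).contains c = d.contains c := by
          simp [PySem.Dict.contains_insert, hcp]
        have h2 : (d.insert p.2 p.1).getD c 0 = d.getD c 0 := by
          rw [PySem.Dict.getD_insert]
          simp [hcp]
        simp [h1, h2, hpc]

-- A's rindex helper: the fold keeps the last matching index
theorem pv_rindex_foldl (l : List (Int × Char)) (c : Char) (init : Int) :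
    l.foldl (fun acc p => if p.2 == c then p.1 else acc) init
    = ((l.filter (fun p => p.2 == c)).map (·.1)).getLastD init := by
  induction l generalizing init with
  | nil => simp
  | cons p l ih =>
    simp only [List.foldl_cons, List.filter_cons]
    by_cases hpc : (p.2 == c) = true
    · rw [if_pos hpc, if_pos hpc, List.map_cons, List.getLastD_cons]
      exact ih p.1
    · rw [if_neg hpc, if_neg hpc]
      exact ih init

-- summing an if over a Nodup list containing x picks up the extra term once
theorem pv_sum_map_ite (ks : List Char) (x : Char) (a : Int) (T : Char → Int)
    (hnd : ks.Nodup) (hx : x ∈ ks) :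
    (ks.map (fun k => if x == k then a + T k else T k)).sum = a + (ks.map T).sum := by
  induction ks with
  | nil => cases hx
  | cons k ks ih =>
    rcases List.nodup_cons.mp hnd with ⟨hnk, hnd'⟩
    simp only [List.map_cons, List.sum_cons]
    by_cases hxk : x = k
    · subst hxk
      have : ks.map (fun k => if x == k then a + T k else T k) = ks.map T := by
        apply List.map_congr_left
        intro y hy
        have : x ≠ y := fun h => hnk (h ▸ hy)
        simp [this]
      simp only [BEq.rfl, if_true, this]
      ring
    · have hx' : x ∈ ks := by
        rcases List.mem_cons.mp hx with h | h
        · exact absurd h hxk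
        · exact h
      have hne : (x == k) = false := by simp [hxk]
      simp only [hne, Bool.false_eq_true, if_false, ih hnd' hx']
      ring

-- partition of a sum over pairs into per-character group sums
theorem pv_partition_sum (f : Int × Char → Int) (l : List (Int × Char)) (ks : List Char)
    (hnd : ks.Nodup) (hcov : ∀ p ∈ l, p.2 ∈ ks) :
    (ks.map (fun c => ((l.filter (fun p => p.2 == c)).map f).sum)).sum = (l.map f).sum := by
  induction l with
  | nil => simp
  | cons p l ih =>
    have hp : p.2 ∈ ks := hcov p (List.mem_cons_self)
    have hstep : ks.map (fun c => (((p :: l).filter (fun q => q.2 == c)).map f).sum)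
        = ks.map (fun c => if p.2 == c then f p + ((l.filter (fun q => q.2 == c)).map f).sum
            else ((l.filter (fun q => q.2 == c)).map f).sum) := by
      apply List.map_congr_left
      intro c _
      simp only [List.filter_cons]
      split
      · simp
      · simp
    rw [hstep, pv_sum_map_ite ks p.2 (f p) _ hnd hp, ih (fun q hq => hcov q (List.mem_cons_of_mem _ hq))]
    simp

-- B's aggregate formula for one group equals the per-position min sum
theorem pv_group (pl : List Int) (a b : Int) :
    (pl.filter (fun q => decide (2 * q ≤ a + b))).sum
      - ((pl.filter (fun q => decide (2 * q ≤ a + b))).length : Int) * a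
      + (((pl.length : Int) - ((pl.filter (fun q => decide (2 * q ≤ a + b))).length : Int)) * b
          - (pl.sum - (pl.filter (fun q => decide (2 * q ≤ a + b))).sum))
    = (pl.map (fun q => min (q - a) (b - q))).sum := by
  induction pl with
  | nil => simp
  | cons q pl ih =>
    simp only [List.filter_cons, List.map_cons, List.sum_cons, List.length_cons]
    by_cases h : 2 * q ≤ a + b
    · have hmin : min (q - a) (b - q) = q - a := min_eq_left (by omega)
      simp only [h, decide_true, if_true, List.sum_cons, List.length_cons, hmin]
      push_cast
      linarith [ih]
    · have hmin : min (q - a) (b - q) = b - q := min_eq_right (by omega)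
      simp only [h, decide_false, hmin]
      push_cast
      linarith [ih]

-- B's grouping dict: getD c [] is exactly the occurrence-index list of c
theorem pv_positions_getD (cs : List Char) (c : Char) :
    (((PySem.List.enumerate cs 0).foldl
        (fun d p => d.modify p.2 [] (fun l => l ++ [p.1])) PySem.Dict.empty).getD c [])
    = pvIdxs cs c := by
  rw [show (PySem.List.enumerate cs 0).foldl
        (fun d p => d.modify p.2 [] (fun l => l ++ [p.1])) PySem.Dict.empty
      = ((PySem.List.enumerate cs 0).map (fun p => (p.2, p.1))).foldl
        (fun d q => d.modify q.1 [] (fun l => l ++ [q.2])) PySem.Dict.empty from by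
      rw [List.foldl_map],
    PySem.Dict.getD_foldl_modify_append, PySem.Dict.getD_empty]
  simp only [List.filter_map, List.map_map, List.nil_append]
  rfl

theorem pv_positions_keys (cs : List Char) :
    ((PySem.List.enumerate cs 0).foldl
        (fun d p => d.modify p.2 [] (fun l => l ++ [p.1])) PySem.Dict.empty).keys
    = PySem.Set.ofList cs := by
  rw [PySem.Dict.keys_foldl_modify_key (PySem.List.enumerate cs 0) (fun p => p.2) []
      (fun _ p => fun l => l ++ [p.1]) PySem.Dict.empty,
    PySem.Dict.keys_empty, PySem.List.map_snd_enumerate, PySem.Set.update_nil_left]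

theorem pv_idxs_ne_nil (cs : List Char) (c : Char) (h : c ∈ cs) : pvIdxs cs c ≠ [] := by
  rcases List.mem_iff_getElem.mp h with ⟨k, hk, hck⟩
  have hmem : ((k : Int), c) ∈ PySem.List.enumerate cs 0 := by
    rw [PySem.List.mem_enumerate_iff]
    exact ⟨k, hk, by simp [hck]⟩
  have hmf : ((k : Int), c) ∈ (PySem.List.enumerate cs 0).filter (fun p => p.2 == c) := by
    simp [List.mem_filter, hmem]
  intro hnil
  have hm2 := List.mem_map_of_mem (f := (·.1)) hmf
  rw [show (((PySem.List.enumerate cs 0).filter (fun p => p.2 == c)).map (·.1)) = pvIdxs cs c from rfl, hnil] at hm2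
  cases hm2

-- ===== VERDICT (by name: the statement is the Claim_ definition above) =====
theorem min_moves_to_minimize_length_spec : Claim_equal_min_moves_to_minimize_length := by
  intro word _
  simp only [Spec_min_moves_to_minimize_length, min_moves_to_minimize_length,
    min_moves_to_minimize_length_alt]
  set cs := word.toList with hcs
  set e := PySem.List.enumerate cs 0 with he
  set f : Int × Char → Int := fun p =>
    min (p.1 - (pvIdxs cs p.2).headD 0) ((pvIdxs cs p.2).getLastD (-1) - p.1) with hf
  -- ---- A side ----
  have hA : e.foldl
      (fun acc (p : Int × Char) => acc +
        min (p.1 - (e.foldl (fun d p => if !(d.contains p.2) then d.insert p.2 p.1 else d)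
              PySem.Dict.empty).getD p.2 0)
          ((cs.length : Int) - 1 - p.1 - ((cs.length : Int) - 1 - pvRindexChar cs p.2))) 0
      = (e.map f).sum := by
    rw [PySem.List.foldl_add]
    rw [zero_add]
    apply congrArg
    apply List.map_congr_left
    intro p hp
    have h1 : (e.foldl (fun d p => if !(d.contains p.2) then d.insert p.2 p.1 else d)
        PySem.Dict.empty).getD p.2 0 = (pvIdxs cs p.2).headD 0 := by
      rw [pv_first_getD, if_neg (by simp)]
      rfl
    have h2 : pvRindexChar cs p.2 = (pvIdxs cs p.2).getLastD (-1) := by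
      rw [pvRindexChar, pv_rindex_foldl]
      rfl
    have h3 : (cs.length : Int) - 1 - p.1 - ((cs.length : Int) - 1 - pvRindexChar cs p.2)
        = (pvIdxs cs p.2).getLastD (-1) - p.1 := by
      rw [h2]; ring
    rw [h1, h3, hf]
  -- ---- B side ----
  set d := e.foldl (fun d (p : Int × Char) => d.modify p.2 [] (fun l => l ++ [p.1]))
    PySem.Dict.empty with hd
  have hnd : d.keys.Nodup := by
    rw [hd]
    exact PySem.Dict.nodup_keys_foldl_modify_key e (fun p => p.2) []
      (fun _ p => fun l => l ++ [p.1]) PySem.Dict.empty PySem.Dict.nodup_keys_empty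
  have hB : d.values.foldl
      (fun acc pl => acc +
        ((pl.filter (fun q => decide (2 * q ≤ PySem.List.pyGetD pl 0 0 + PySem.List.pyGetD pl (-1) 0))).sum
          - (((pl.filter (fun q => decide (2 * q ≤ PySem.List.pyGetD pl 0 0 + PySem.List.pyGetD pl (-1) 0))).length : Int)) * PySem.List.pyGetD pl 0 0
          + (((pl.length : Int) - (((pl.filter (fun q => decide (2 * q ≤ PySem.List.pyGetD pl 0 0 + PySem.List.pyGetD pl (-1) 0))).length : Int))) * PySem.List.pyGetD pl (-1) 0
              - (pl.sum - (pl.filter (fun q => decide (2 * q ≤ PySem.List.pyGetD pl 0 0 + PySem.List.pyGetD pl (-1) 0))).sum)))) 0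
      = ((PySem.Set.ofList cs).map
          (fun c => ((e.filter (fun p => p.2 == c)).map f).sum)).sum := by
    rw [PySem.List.foldl_add, zero_add,
      PySem.Dict.values_eq_map_keys d hnd [], List.map_map]
    have hk : d.keys = PySem.Set.ofList cs := by rw [hd, he]; exact pv_positions_keys cs
    rw [hk]
    apply congrArg
    apply List.map_congr_left
    intro c hc
    have hcc : c ∈ cs := (PySem.Set.mem_ofList cs c).mp hc
    have hgd : d.getD c [] = pvIdxs cs c := by rw [hd, he]; exact pv_positions_getD cs c
    have hne : pvIdxs cs c ≠ [] := pv_idxs_ne_nil cs c hcc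
    obtain ⟨x, xs, hxl⟩ := List.exists_cons_of_ne_nil hne
    have h0 : PySem.List.pyGetD (pvIdxs cs c) 0 0 = (pvIdxs cs c).headD 0 := by
      rw [hxl, PySem.List.pyGetD_zero_cons, List.headD_cons]
    have h1 : PySem.List.pyGetD (pvIdxs cs c) (-1) 0 = (pvIdxs cs c).getLastD (-1) := by
      rw [hxl, PySem.List.pyGetD_neg_one (x :: xs) 0 (by simp),
        List.getLastD_eq_getLast?, List.getLast?_eq_some_getLast (by simp),
        Option.getD_some]
    simp only [Function.comp_apply, hgd, h0, h1]
    set a := (pvIdxs cs c).headD 0 with ha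
    set b := (pvIdxs cs c).getLastD (-1) with hb
    rw [pv_group (pvIdxs cs c) a b]
    have hmap : pvIdxs cs c = ((e.filter (fun p => p.2 == c)).map (·.1)) := rfl
    rw [hmap, List.map_map]
    apply congrArg
    apply List.map_congr_left
    intro p hp
    have hp2 : p.2 = c := by
      have := (List.mem_filter.mp hp).2
      simpa using this
    simp only [Function.comp_apply, hf, hp2, ha, hb]
  -- ---- combine ----
  rw [hA, hB]
  refine (pv_partition_sum f e (PySem.Set.ofList cs) (PySem.Set.nodup_ofList cs) ?_).symm
  intro p hp
  rw [PySem.Set.mem_ofList]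
  rw [he, PySem.List.mem_enumerate_iff] at hp
  obtain ⟨k, hk, rfl⟩ := hp
  simp
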